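-- pv_equiv track=rewrite | github.com/Pmamos/OW_lab4 | newLab4/RSM/RSM_new.py | is_point1_dominating_point2
-- ===== SOURCE A (Python) =====
-- from typing import List, Tuple, Union
--
-- def is_point1_dominating_point2(
--     point1: List[int], point2: List[int], directions: List[str]
-- ):
--     result: List[bool] = []
--     for i in range(len(directions)):
--         if directions[i] == "min":
--             result.append(all(x1 <= x2 for x1, x2 in zip(point1, point2)))
--         elif directions[i] == "max":
--             result.append(all(x1 >= x2 for x1, x2 in zip(point1, point2)))
--
--     if all(result):
--         return True
--     else:
--         return False
-- ===== SOURCE B (Python) =====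
-- def is_point1_dominating_point2(point1, point2, directions):
--     le = ge = True
--     for x1, x2 in zip(point1, point2):
--         le = le and x1 <= x2
--         ge = ge and x1 >= x2
--     return (le or "min" not in directions) and (ge or "max" not in directions)
-- ===== Notes on version B (the rewrite author's own statement) =====
-- stated objective: simpler
-- what changed: Instead of re-scanning the zipped points for every 'min'/'max' entry of directions and collecting a bool list, B computes allLE/allGE in one pass over the points and combines them with one membership test per direction kind.
import Mathlib
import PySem

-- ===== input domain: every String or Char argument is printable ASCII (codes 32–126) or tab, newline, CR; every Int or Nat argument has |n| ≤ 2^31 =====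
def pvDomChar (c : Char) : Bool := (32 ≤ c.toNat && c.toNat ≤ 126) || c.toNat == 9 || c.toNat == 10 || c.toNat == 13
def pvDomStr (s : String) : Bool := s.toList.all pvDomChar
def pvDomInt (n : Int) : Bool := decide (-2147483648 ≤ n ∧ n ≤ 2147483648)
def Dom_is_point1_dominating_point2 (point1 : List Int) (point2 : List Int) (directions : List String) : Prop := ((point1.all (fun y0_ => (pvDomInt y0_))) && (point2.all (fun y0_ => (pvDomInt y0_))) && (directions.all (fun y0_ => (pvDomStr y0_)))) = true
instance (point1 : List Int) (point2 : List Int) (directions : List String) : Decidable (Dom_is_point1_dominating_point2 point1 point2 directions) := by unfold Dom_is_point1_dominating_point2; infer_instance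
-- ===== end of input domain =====

-- B replaces A's per-direction rescan of the zipped points (and the collected bool list)
-- by one pass computing allLE/allGE plus one membership test per direction kind (objective: simpler).

-- ===== PORT A =====
def is_point1_dominating_point2 (point1 : List Int) (point2 : List Int) (directions : List String) : Bool :=
  let result : List Bool :=
    (PySem.List.pyRange 0 (directions.length) 1).foldl (fun res i =>
      let d := PySem.List.pyGetD directions i ""
      if d = "min" then res ++ [(point1.zip point2).all (fun xy => decide (xy.1 ≤ xy.2))]
      else if d = "max" then res ++ [(point1.zip point2).all (fun xy => decide (xy.1 ≥ xy.2))]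
      else res) []
  if result.all id then true else false

-- ===== PORT B =====
def is_point1_dominating_point2_alt (point1 : List Int) (point2 : List Int) (directions : List String) : Bool :=
  let lg := (point1.zip point2).foldl
    (fun (lg : Bool × Bool) xy => (lg.1 && decide (xy.1 ≤ xy.2), lg.2 && decide (xy.1 ≥ xy.2)))
    (true, true)
  (lg.1 || !(directions.contains "min")) && (lg.2 || !(directions.contains "max"))

-- ===== PRECONDITION & SPEC =====
def Spec_is_point1_dominating_point2 (point1 : List Int) (point2 : List Int) (directions : List String) (out : Bool) : Prop := out = is_point1_dominating_point2_alt point1 point2 directions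
instance (point1 : List Int) (point2 : List Int) (directions : List String) (out : Bool) : Decidable (Spec_is_point1_dominating_point2 point1 point2 directions out) := by unfold Spec_is_point1_dominating_point2; infer_instance

-- ===== CLAIM (what is proved, stated in full; the proofs are below) =====
def Claim_equal_is_point1_dominating_point2 : Prop := ∀ (point1 : List Int) (point2 : List Int) (directions : List String), Dom_is_point1_dominating_point2 point1 point2 directions → Spec_is_point1_dominating_point2 point1 point2 directions (is_point1_dominating_point2 point1 point2 directions)

-- ===== LEMMAS AND PROOFS =====

-- B's paired fold computes (all ≤, all ≥), for any starting accumulator.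
theorem pv_pairFold (zs : List (Int × Int)) : ∀ (a b : Bool),
    zs.foldl (fun (lg : Bool × Bool) xy => (lg.1 && decide (xy.1 ≤ xy.2), lg.2 && decide (xy.1 ≥ xy.2))) (a, b)
      = (a && zs.all (fun xy => decide (xy.1 ≤ xy.2)), b && zs.all (fun xy => decide (xy.1 ≥ xy.2))) := by
  induction zs with
  | nil => simp [List.foldl]
  | cons z zs ih =>
    intro a b
    simp only [List.foldl, ih, List.all_cons, Bool.and_assoc]

-- A's directions loop: all of the collected bool list, for any already-collected prefix.
theorem pv_dirFold (le ge : Bool) (ds : List String) : ∀ (res : List Bool),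
    (ds.foldl (fun res d =>
        if d = "min" then res ++ [le] else if d = "max" then res ++ [ge] else res) res).all id
      = (res.all id && (le || !(ds.contains "min")) && (ge || !(ds.contains "max"))) := by
  induction ds with
  | nil => simp
  | cons d ds ih =>
    intro res
    by_cases h1 : d = "min"
    · subst h1
      simp only [List.foldl, ih, List.contains_cons]
      cases le <;> cases ge <;> simp
    · by_cases h2 : d = "max"
      · subst h2
        simp only [List.foldl, if_neg (show ¬("max" : String) = "min" by decide), ih,
          List.contains_cons]
        cases le <;> cases ge <;> simp
      · simp only [List.foldl, if_neg h1, if_neg h2, ih, List.contains_cons]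
        have e1 : ("min" == d) = false := by rw [beq_eq_false_iff_ne]; exact fun h => h1 h.symm
        have e2 : ("max" == d) = false := by rw [beq_eq_false_iff_ne]; exact fun h => h2 h.symm
        simp [e1, e2]

-- ===== VERDICT (by name: the statement is the Claim_ definition above) =====
theorem is_point1_dominating_point2_spec : Claim_equal_is_point1_dominating_point2 := by
  intro p1 p2 ds _hdom
  unfold Spec_is_point1_dominating_point2 is_point1_dominating_point2 is_point1_dominating_point2_alt
  show (if (List.foldl (fun res i =>
          if PySem.List.pyGetD ds i "" = "min" then res ++ [(p1.zip p2).all fun xy => decide (xy.1 ≤ xy.2)]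
          else if PySem.List.pyGetD ds i "" = "max" then res ++ [(p1.zip p2).all fun xy => decide (xy.1 ≥ xy.2)]
          else res) [] (PySem.List.pyRange 0 (ds.length : Int) 1)).all id then true else false) = _
  rw [PySem.List.foldl_pyRange_zero_pyGetD' ds ""
        (fun res d => if d = "min" then res ++ [(p1.zip p2).all (fun xy => decide (xy.1 ≤ xy.2))]
          else if d = "max" then res ++ [(p1.zip p2).all (fun xy => decide (xy.1 ≥ xy.2))] else res) []]
  rw [pv_pairFold, pv_dirFold]
  simp
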